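-- pv_equiv track=rewrite | github.com/homidovazizjon9-dotcom/Sportadela | data/fetch_stats.py | pick_latest_pl_season
-- ===== SOURCE A (Python) =====
-- def pick_latest_pl_season(competitions):
--     pl = [
--         comp
--         for comp in competitions
--         if comp.get("competition_name") == "Premier League"
--     ]
--     if not pl:
--         raise RuntimeError("Premier League competition not found in StatsBomb data.")
--     pl.sort(key=lambda c: (c.get("season_start_date") or ""), reverse=True)
--     return pl[0]
-- ===== SOURCE B (Python) =====
-- def pick_latest_pl_season(competitions):
--     best = None
--     best_key = ""
--     for comp in competitions:
--         if comp.get("competition_name") == "Premier League":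
--             key = comp.get("season_start_date") or ""
--             if best is None or key > best_key:
--                 best, best_key = comp, key
--     if best is None:
--         raise RuntimeError("Premier League competition not found in StatsBomb data.")
--     return best
-- ===== Notes on version B (the rewrite author's own statement) =====
-- stated objective: simpler
-- what changed: Replaces filter + stable reverse sort + index [0] with a single fused pass that keeps the first Premier League comp with the strictly greatest season_start_date key.
import Mathlib
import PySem

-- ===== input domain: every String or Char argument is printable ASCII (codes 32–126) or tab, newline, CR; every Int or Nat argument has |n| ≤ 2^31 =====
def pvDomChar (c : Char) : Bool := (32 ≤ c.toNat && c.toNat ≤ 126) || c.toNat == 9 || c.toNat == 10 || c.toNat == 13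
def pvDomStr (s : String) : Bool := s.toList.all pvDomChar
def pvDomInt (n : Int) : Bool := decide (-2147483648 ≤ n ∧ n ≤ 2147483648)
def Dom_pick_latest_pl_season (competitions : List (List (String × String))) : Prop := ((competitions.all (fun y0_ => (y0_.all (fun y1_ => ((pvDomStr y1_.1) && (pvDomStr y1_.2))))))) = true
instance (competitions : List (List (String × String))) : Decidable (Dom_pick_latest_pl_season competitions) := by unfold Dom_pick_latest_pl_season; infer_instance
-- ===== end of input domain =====

-- B fuses A's filter + stable reverse sort + [0] into one linear scan keeping the first
-- comp with the strictly greatest season_start_date key; objective: simpler (one pass, no sort).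

-- ===== PORT A =====
-- comp.get("competition_name") == "Premier League"
def pvIsPL (comp : List (String × String)) : Bool :=
  PySem.Dict.get? (PySem.Dict.mk comp) "competition_name" == some "Premier League"

-- c.get("season_start_date") or ""  (None → ""; "" → "", so getD "" is exact)
def pvKey (comp : List (String × String)) : String :=
  (PySem.Dict.get? (PySem.Dict.mk comp) "season_start_date").getD ""

def pick_latest_pl_season (competitions : List (List (String × String))) : List (String × String) :=
  let pl := competitions.filter pvIsPL
  -- the 'if not pl: raise RuntimeError' branch is excluded by Pre_; headD's default is unreachable there
  let plSorted := PySem.List.sorted pl pvKey true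
  plSorted.headD []

-- ===== PORT B =====
-- one pass: best = None / best_key = ""; update when best is None or key > best_key
def pvStep (st : Option (List (String × String)) × String) (comp : List (String × String)) :
    Option (List (String × String)) × String :=
  if pvIsPL comp then
    let key := pvKey comp
    match st.1 with
    | none => (some comp, key)
    | some _ => if st.2 < key then (some comp, key) else st
  else st

def pick_latest_pl_season_alt (competitions : List (List (String × String))) : List (String × String) :=
  let st := competitions.foldl pvStep (none, "")
  match st.1 with
  | none => []   -- 'raise RuntimeError' in Source B; excluded by Pre_
  | some best => best

-- ===== PRECONDITION & SPEC =====
-- Pre_ excludes exactly the inputs with no Premier League entry, on which A raises RuntimeError.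
def Pre_pick_latest_pl_season (competitions : List (List (String × String))) : Prop :=
  competitions.any pvIsPL = true
instance (competitions : List (List (String × String))) : Decidable (Pre_pick_latest_pl_season competitions) := by unfold Pre_pick_latest_pl_season; infer_instance

def pvWitness_pick_latest_pl_season : (List (List (String × String))) :=
  [[("competition_name", "Premier League"), ("season_start_date", "2023-08-11")]]

def Spec_pick_latest_pl_season (competitions : List (List (String × String))) (out : List (String × String)) : Prop := out = pick_latest_pl_season_alt competitions
instance (competitions : List (List (String × String))) (out : List (String × String)) : Decidable (Spec_pick_latest_pl_season competitions out) := by unfold Spec_pick_latest_pl_season; infer_instance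

-- ===== CLAIM (what is proved, stated in full; the proofs are below) =====
def Claim_equal_pick_latest_pl_season : Prop := ∀ (competitions : List (List (String × String))), Dom_pick_latest_pl_season competitions → Pre_pick_latest_pl_season competitions → Spec_pick_latest_pl_season competitions (pick_latest_pl_season competitions)

-- ===== LEMMAS AND PROOFS =====

-- running "first strict max" over t starting from b
def pvRun (b : List (String × String)) (t : List (List (String × String))) : List (String × String) :=
  t.foldl (fun r x => if pvKey r < pvKey x then x else r) b

-- head of the insertion-sort fold (reverse order) is the running first strict max
theorem pvSortedHead (t : List (List (String × String)))
    (b : List (String × String)) (acc : List (List (String × String))) :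
    (t.foldl (fun acc x => PySem.List.insertBy (fun a c => decide (pvKey c < pvKey a)) x acc) (b :: acc)).head? =
      some (pvRun b t) := by
  induction t generalizing b acc with
  | nil => simp [pvRun]
  | cons x xs ih =>
    simp only [List.foldl_cons, PySem.List.insertBy, pvRun, List.foldl_cons]
    by_cases h : pvKey b < pvKey x
    · simp only [h, decide_true, if_true]
      exact ih x (b :: acc)
    · simp only [h, decide_false, if_false]
      exact ih b _

-- the post-filter step of B's loop (pvStep with the membership test already known true)
def pvStepF (st : Option (List (String × String)) × String) (comp : List (String × String)) :
    Option (List (String × String)) × String :=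
  let key := pvKey comp
  match st.1 with
  | none => (some comp, key)
  | some _ => if st.2 < key then (some comp, key) else st

-- B's fold from a 'some' state with matching key tracks pvRun
theorem pvFoldSome (t : List (List (String × String))) (b : List (String × String)) :
    t.foldl pvStepF (some b, pvKey b) = (some (pvRun b t), pvKey (pvRun b t)) := by
  induction t generalizing b with
  | nil => simp [pvRun]
  | cons x xs ih =>
    simp only [List.foldl_cons, pvStepF, pvRun, List.foldl_cons]
    by_cases h : pvKey b < pvKey x
    · rw [if_pos h, if_pos h]
      exact ih x
    · rw [if_neg h, if_neg h]
      exact ih b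

-- ===== VERDICT (by name: the statement is the Claim_ definition above) =====
theorem pick_latest_pl_season_spec : Claim_equal_pick_latest_pl_season := by
  intro competitions _ hpre
  unfold Spec_pick_latest_pl_season pick_latest_pl_season pick_latest_pl_season_alt
  have hps : pvStep = fun st comp => if pvIsPL comp then pvStepF st comp else st := rfl
  rw [hps, PySem.List.foldl_if_eq_foldl_filter]
  unfold Pre_pick_latest_pl_season at hpre
  have hne : competitions.filter pvIsPL ≠ [] := by
    simp only [ne_eq, List.filter_eq_nil_iff]
    intro hall
    rcases List.any_eq_true.mp hpre with ⟨x, hx, hpx⟩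
    exact absurd hpx (by simpa using hall x hx)
  obtain ⟨a, t, hat⟩ := List.exists_cons_of_ne_nil hne
  rw [hat]
  -- B side: first element puts the state at (some a, key a), then pvFoldSome
  have hstep0 : pvStepF ((none : Option (List (String × String))), "") a = (some a, pvKey a) := rfl
  rw [List.foldl_cons, hstep0, pvFoldSome]
  show (PySem.List.sorted (a :: t) pvKey true).headD [] = pvRun a t
  -- A side: head of the reverse insertion-sort fold is the running first strict max
  rw [PySem.List.sorted_rev_eq_foldl_insertBy]
  simp only [List.foldl_cons, PySem.List.insertBy]
  have hh := pvSortedHead t a []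
  rcases he : (t.foldl (fun acc x => PySem.List.insertBy (fun a c => decide (pvKey c < pvKey a)) x acc) [a]) with _ | ⟨h, hs⟩
  · rw [he] at hh; simp at hh
  · rw [he] at hh
    simp only [List.head?_cons, Option.some.injEq] at hh
    simp [hh]
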